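-- pv_equiv track=rewrite | github.com/paraester/Gera-o-de-Planilhas-Excel-com-Dados-e-Totaliza-o | tk_modelo_planilha_dado_lista-de-nomes_tabela-total.py | identificar_duplicidade_nomes
-- ===== SOURCE A (Python) =====
-- def identificar_duplicidade_nomes(lista_nomes):
--     primeiro_nome_count = {}
--     for nome in lista_nomes:
--         primeiro_nome = nome.split()[0]
--         if primeiro_nome in primeiro_nome_count:
--             primeiro_nome_count[primeiro_nome] += 1
--         else:
--             primeiro_nome_count[primeiro_nome] = 1
--     return primeiro_nome_count
-- ===== SOURCE B (Python) =====
-- def identificar_duplicidade_nomes(lista_nomes):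
--     # Sort the first names and count consecutive runs (O(n log n)),
--     # then emit the counts in first-occurrence order via dict.fromkeys.
--     primeiros = [nome.split()[0] for nome in lista_nomes]
--     ordenados = sorted(primeiros)
--     counts = {}
--     i = 0
--     n = len(ordenados)
--     while i < n:
--         j = i + 1
--         while j < n and ordenados[j] == ordenados[i]:
--             j += 1
--         counts[ordenados[i]] = j - i
--         i = j
--     return {nome: counts[nome] for nome in dict.fromkeys(primeiros)}
-- ===== Notes on version B (the rewrite author's own statement) =====
-- stated objective: alternative
-- what changed: Replaces the incremental dict-update loop by sort-then-run-length counting: sort the extracted first names, count each maximal run of equal consecutive names, and emit the counts in first-occurrence order via dict.fromkeys.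
import Mathlib
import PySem

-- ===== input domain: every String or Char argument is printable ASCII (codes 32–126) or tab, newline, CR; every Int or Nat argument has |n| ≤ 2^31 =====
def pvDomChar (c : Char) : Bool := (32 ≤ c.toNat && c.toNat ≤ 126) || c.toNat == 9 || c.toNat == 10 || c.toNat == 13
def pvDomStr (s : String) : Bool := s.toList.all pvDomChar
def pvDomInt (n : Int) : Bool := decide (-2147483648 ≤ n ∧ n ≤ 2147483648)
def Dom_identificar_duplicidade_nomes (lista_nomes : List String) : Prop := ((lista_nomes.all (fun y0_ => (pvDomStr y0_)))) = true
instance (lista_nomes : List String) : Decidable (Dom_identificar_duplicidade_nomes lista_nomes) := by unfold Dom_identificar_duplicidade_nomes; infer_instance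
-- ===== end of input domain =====

-- B counts first names by sorting and run-length counting instead of A's incremental dict updates; equal output (first-occurrence order), alternative O(n log n) structure.


-- ===== PORT A =====
-- nome.split()[0]; the [0] is pyGet? (none = IndexError, excluded by Pre_), defaulted only outside Pre_
def pvFirstName (nome : String) : String :=
  (PySem.List.pyGet? (PySem.Str.split₀ nome) 0).getD ""

def identificar_duplicidade_nomes (lista_nomes : List String) : List (String × Int) :=
  (lista_nomes.foldl (fun primeiro_nome_count nome =>
      let primeiro_nome := pvFirstName nome
      if primeiro_nome_count.contains primeiro_nome then
        primeiro_nome_count.insert primeiro_nome (primeiro_nome_count.getD primeiro_nome 0 + 1)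
      else
        primeiro_nome_count.insert primeiro_nome 1)
    PySem.Dict.empty).items

-- ===== PORT B =====
-- the index-based while loops of Source B on the sorted list: the inner loop scanning the run
-- ordenados[i..j) is takeWhile, advancing i to j is dropWhile, and j - i = 1 + run.length
def pvRuns : List String → PySem.Dict String Int → PySem.Dict String Int
  | [], counts => counts
  | x :: rest, counts =>
      pvRuns (rest.dropWhile (fun y => y == x))
             (counts.insert x (1 + (rest.takeWhile (fun y => y == x)).length))
  termination_by l => l.length
  decreasing_by
    simpa using Nat.lt_succ_of_le (List.length_dropWhile_le _ _)

def identificar_duplicidade_nomes_alt (lista_nomes : List String) : List (String × Int) :=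
  let primeiros := lista_nomes.map pvFirstName
  let counts := pvRuns (PySem.List.sorted primeiros (fun x => x) false) PySem.Dict.empty
  -- counts[nome]: the key is always present (nome ∈ primeiros), so the default is never used
  (PySem.List.dedup primeiros).map (fun nome => (nome, counts.getD nome 0))

-- ===== PRECONDITION & SPEC =====
-- Pre_ excludes exactly the inputs where some name is empty/whitespace-only: there nome.split()[0] raises IndexError in both A and B.
def Pre_identificar_duplicidade_nomes (lista_nomes : List String) : Prop :=
  ∀ nome ∈ lista_nomes, PySem.Str.split₀ nome ≠ []
instance (lista_nomes : List String) : Decidable (Pre_identificar_duplicidade_nomes lista_nomes) := by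
  unfold Pre_identificar_duplicidade_nomes; infer_instance

def pvWitness_identificar_duplicidade_nomes : List String :=
  ["Ana Silva", "Bruno Costa", "Ana Lima"]

def Spec_identificar_duplicidade_nomes (lista_nomes : List String) (out : List (String × Int)) : Prop := out = identificar_duplicidade_nomes_alt lista_nomes
instance (lista_nomes : List String) (out : List (String × Int)) : Decidable (Spec_identificar_duplicidade_nomes lista_nomes out) := by unfold Spec_identificar_duplicidade_nomes; infer_instance

-- ===== CLAIM (what is proved, stated in full; the proofs are below) =====
def Claim_equal_identificar_duplicidade_nomes : Prop := ∀ (lista_nomes : List String), Dom_identificar_duplicidade_nomes lista_nomes → Pre_identificar_duplicidade_nomes lista_nomes → Spec_identificar_duplicidade_nomes lista_nomes (identificar_duplicidade_nomes lista_nomes)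

-- ===== LEMMAS AND PROOFS =====
-- A's loop body is the standard counting step
theorem pvStep_eq (d : PySem.Dict String Int) (x : String) :
    (if d.contains x then d.insert x (d.getD x 0 + 1) else d.insert x 1)
      = d.insert x (d.getD x 0 + 1) := by
  by_cases h : d.contains x = true
  · simp [h]
  · simp [h, PySem.Dict.getD_of_not_contains d 0 (by simpa using h)]

-- run-length counting over a ≤-sorted list computes the multiplicity of every member
theorem pvRuns_getD (l : List String) (hl : l.Pairwise (· ≤ ·)) (k : String)
    (d : PySem.Dict String Int) :
    (pvRuns l d).getD k 0 = if k ∈ l then (l.count k : Int) else d.getD k 0 := by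
  induction l, d using pvRuns.induct with
  | case1 => simp [pvRuns]
  | case2 x rest counts ih =>
    have hsplit : rest.takeWhile (fun y => y == x) ++ rest.dropWhile (fun y => y == x) = rest :=
      List.takeWhile_append_dropWhile
    have hxle : ∀ y ∈ rest, x ≤ y := fun y hy => (List.pairwise_cons.mp hl).1 y hy
    have hrest : rest.Pairwise (· ≤ ·) := (List.pairwise_cons.mp hl).2
    have hdropP : (rest.dropWhile (fun y => y == x)).Pairwise (· ≤ ·) :=
      hrest.sublist (List.dropWhile_sublist _)
    have hrunx : ∀ y ∈ rest.takeWhile (fun y => y == x), y = x := by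
      intro y hy
      simpa using List.mem_takeWhile_imp hy
    -- no x survives the run in a sorted list
    have hxdrop : x ∉ rest.dropWhile (fun y => y == x) := by
      intro hmem
      rcases hd : rest.dropWhile (fun y => y == x) with _ | ⟨h0, t⟩
      · simp [hd] at hmem
      · have hne : (h0 == x) = false := by
          have hh := List.head?_dropWhile_not (fun y => y == x) rest
          rw [hd] at hh
          simpa using hh
        have h0mem : h0 ∈ rest := (List.dropWhile_sublist _).mem (by rw [hd]; exact List.mem_cons_self)
        have hx0' : x < h0 :=
          lt_of_le_of_ne (hxle h0 h0mem) (fun he => by rw [he] at hne; simp at hne)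
        rw [hd] at hmem
        rcases List.mem_cons.mp hmem with h | h
        · exact absurd h (ne_of_lt hx0')
        · have hle : h0 ≤ x := (List.pairwise_cons.mp (hd ▸ hdropP)).1 x h
          exact absurd (lt_of_lt_of_le hx0' hle) (lt_irrefl x)
    rw [pvRuns, ih hdropP]
    by_cases hk : k = x
    · subst hk
      have hcrun : (rest.takeWhile (fun y => y == k)).count k
          = (rest.takeWhile (fun y => y == k)).length := by
        rw [List.count_eq_length]
        intro y hy; exact (hrunx y hy).symm
      have hcdrop : (rest.dropWhile (fun y => y == k)).count k = 0 :=
        List.count_eq_zero.mpr hxdrop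
      have hrc : rest.count k = (rest.takeWhile (fun y => y == k)).length := by
        conv_lhs => rw [← hsplit]
        rw [List.count_append, hcrun, hcdrop]
        omega
      have hcnt : (k :: rest).count k = 1 + (rest.takeWhile (fun y => y == k)).length := by
        rw [List.count_cons_self, hrc]
        omega
      rw [if_neg hxdrop, if_pos (List.mem_cons_self), hcnt, PySem.Dict.getD_insert]
      simp
    · have hkrun : k ∉ rest.takeWhile (fun y => y == x) := fun h => hk (hrunx k h)
      by_cases hmem : k ∈ rest.dropWhile (fun y => y == x)
      · have hkrest : k ∈ x :: rest :=
          List.mem_cons_of_mem _ ((List.dropWhile_sublist _).mem hmem)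
        have hrc : rest.count k = (rest.dropWhile (fun y => y == x)).count k := by
          conv_lhs => rw [← hsplit]
          rw [List.count_append, List.count_eq_zero.mpr hkrun]
          omega
        have hcount : (x :: rest).count k = (rest.dropWhile (fun y => y == x)).count k := by
          simp [Ne.symm hk, hrc]
        rw [if_pos hmem, if_pos hkrest, hcount]
      · have hkrest : k ∉ x :: rest := by
          intro h
          rcases List.mem_cons.mp h with h | h
          · exact hk h
          · rw [← hsplit] at h
            rcases List.mem_append.mp h with h | h
            · exact hkrun h
            · exact hmem h
        rw [if_neg hmem, if_neg hkrest, PySem.Dict.getD_insert, if_neg hk]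

-- ===== VERDICT (by name: the statement is the Claim_ definition above) =====
theorem identificar_duplicidade_nomes_spec : Claim_equal_identificar_duplicidade_nomes := by
  intro lista_nomes _ _
  unfold Spec_identificar_duplicidade_nomes identificar_duplicidade_nomes identificar_duplicidade_nomes_alt
  dsimp only
  -- A's side: the fold over names is Counter(primeiros)
  have hfun : (fun (d : PySem.Dict String Int) (nome : String) =>
      if d.contains (pvFirstName nome) then d.insert (pvFirstName nome) (d.getD (pvFirstName nome) 0 + 1)
      else d.insert (pvFirstName nome) 1)
      = (fun (d : PySem.Dict String Int) (nome : String) =>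
          d.insert (pvFirstName nome) (d.getD (pvFirstName nome) 0 + 1)) := by
    funext d nome; exact pvStep_eq d (pvFirstName nome)
  have hmap : (List.map pvFirstName lista_nomes).foldl
      (fun (d : PySem.Dict String Int) x => d.insert x (d.getD x 0 + 1)) PySem.Dict.empty
      = lista_nomes.foldl
          (fun (d : PySem.Dict String Int) nome =>
            d.insert (pvFirstName nome) (d.getD (pvFirstName nome) 0 + 1)) PySem.Dict.empty :=
    List.foldl_map
  rw [hfun, ← hmap, PySem.Dict.foldl_insert_getD_add_one_eq_counter, PySem.Dict.items_counter]
  -- B's side: run-length counts on the sorted list are multiplicities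
  refine List.map_congr_left ?_
  intro nome hmem
  have hmem' : nome ∈ List.map pvFirstName lista_nomes := (PySem.List.mem_dedup _ _).mp hmem
  have hmemS : nome ∈ PySem.List.sorted (List.map pvFirstName lista_nomes) (fun x => x) false :=
    (PySem.List.mem_sorted _ _ _ _).mpr hmem'
  rw [pvRuns_getD _ (by simpa using PySem.List.sorted_pairwise (List.map pvFirstName lista_nomes) (fun x => x)) nome PySem.Dict.empty]
  simp [hmemS, (PySem.List.sorted_perm (List.map pvFirstName lista_nomes) (fun x => x) false).count_eq]
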